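-- pv_equiv track=rewrite | github.com/koke228666/exchange-rates-tg-bot | Processing.py | SpecialSplit
-- ===== SOURCE A (Python) =====
-- def SpecialSplit(MesTxt: str) -> list:
--     MesTxt = MesTxt.replace("\n", " , ") # Replace hyphenation with dot
--
--     while MesTxt.find("  ") != -1: # Removing double spaces
--         MesTxt = MesTxt.replace("  ", " ")
--
--     while MesTxt.find("'") != -1: # Removing apostrophes
--         MesTxt = MesTxt.replace("'", "")
--
--     for i in range(len(MesTxt) - 2):
--         if MesTxt[i].isdigit() and MesTxt[i + 2].isdigit() and MesTxt[i + 1] == ",":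
--             MesTxt = MesTxt[0:i + 1] + "." + MesTxt[i + 2:len(MesTxt)] # comma to dot
--
--     a = [] #The main array to which the result will be written
--     start = 0
--     end = 0
--     for i in range(len(MesTxt)):
--         if MesTxt[i] == " ":
--             end = i
--             a.append(MesTxt[start:end])
--             start = end + 1
--         elif i == len(MesTxt) - 1:
--             end = len(MesTxt)
--             a.append(MesTxt[start:end])
--         elif MesTxt[i].isalpha() and not MesTxt[i + 1].isalpha() and not MesTxt[i + 1].isdigit(): #separating letters from symbols
--             end = i + 1
--             a.append(MesTxt[start:end])
--             start = end
--         elif MesTxt[i + 1].isalpha() and not MesTxt[i].isalpha() and not MesTxt[i].isdigit(): #separating symbols from letters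
--             end = i + 1
--             a.append(MesTxt[start:end])
--             start = end
--         elif not MesTxt[i].isalpha() and not MesTxt[i].isdigit() and not MesTxt[i + 1].isalpha() and not MesTxt[i + 1].isdigit(): #separating symbols from letters
--             end = i + 1
--             a.append(MesTxt[start:end])
--             start = end
--         elif MesTxt[i].isdigit() and not MesTxt[i + 1].isdigit() and MesTxt[i + 1] != " " and MesTxt[i + 1] != ".": #separating a digit from a letter
--             end = i + 1
--             a.append(MesTxt[start:end])
--             start = end
--         elif not MesTxt[i].isdigit() and MesTxt[i + 1].isdigit() and MesTxt[i] != " " and MesTxt[i] != ".": #separating a letter from a digit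
--             end = i + 1
--             a.append(MesTxt[start:end])
--             start = end
--     b = []
--     for i in a:
--         if i != "":
--             b.append(i)
--
--     for i in range(len(b)):
--         if b[i][0].isdigit() and b[i].count(".") >= 2:
--             while b[i].find(".") != -1:
--                 b[i] = b[i].replace(".", "")
--
--     return b
-- ===== SOURCE B (Python) =====
-- def _same(c, d):
--     return (c.isalpha() and d.isalpha()) or (c.isdigit() and d.isdigit()) \
--         or (c.isdigit() and d == ".") or (c == "." and d.isdigit())
--
-- def SpecialSplit(MesTxt: str) -> list:
--     # preprocessing kept identical to the original
--     MesTxt = MesTxt.replace("\n", " , ")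
--     while MesTxt.find("  ") != -1:
--         MesTxt = MesTxt.replace("  ", " ")
--     while MesTxt.find("'") != -1:
--         MesTxt = MesTxt.replace("'", "")
--     for i in range(len(MesTxt) - 2):
--         if MesTxt[i].isdigit() and MesTxt[i + 2].isdigit() and MesTxt[i + 1] == ",":
--             MesTxt = MesTxt[0:i + 1] + "." + MesTxt[i + 2:len(MesTxt)]
--     s = MesTxt
--     # phase 1: boundary indices (before/after every space, and between non-same-token pairs)
--     cuts = []
--     for i in range(len(s) - 1):
--         if s[i] == " " or s[i + 1] == " " or not _same(s[i], s[i + 1]):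
--             cuts.append(i + 1)
--     # phase 2: slice at the boundaries, dropping space and empty pieces
--     tokens = []
--     prev = 0
--     for c in cuts + [len(s)]:
--         piece = s[prev:c]
--         if piece != "" and piece != " ":
--             tokens.append(piece)
--         prev = c
--     # final multi-dot numeric collapse
--     return [t.replace(".", "") if t[0].isdigit() and t.count(".") >= 2 else t for t in tokens]
-- ===== Notes on version B (the rewrite author's own statement) =====
-- stated objective: alternative
-- what changed: The interleaved lookahead/start-end tokenizer is replaced by a two-phase tokenizer: one pass over adjacent character pairs collects boundary indices (before/after spaces and between non-same-token pairs), then the string is sliced at those boundaries, dropping space/empty pieces; preprocessing is kept identical.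
import Mathlib
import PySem

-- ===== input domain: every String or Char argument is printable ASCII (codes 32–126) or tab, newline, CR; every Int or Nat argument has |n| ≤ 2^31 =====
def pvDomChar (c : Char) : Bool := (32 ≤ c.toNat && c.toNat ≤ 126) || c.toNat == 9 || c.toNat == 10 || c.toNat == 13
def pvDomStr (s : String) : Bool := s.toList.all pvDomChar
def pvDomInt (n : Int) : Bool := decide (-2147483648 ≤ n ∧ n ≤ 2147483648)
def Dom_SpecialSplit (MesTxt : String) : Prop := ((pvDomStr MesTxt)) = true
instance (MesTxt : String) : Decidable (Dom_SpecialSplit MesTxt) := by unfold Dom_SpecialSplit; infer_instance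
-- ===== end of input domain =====

-- B replaces A's interleaved lookahead/start-end tokenizer by a two-phase boundary-list-then-slice
-- tokenizer (alternative decomposition; a timing run measured it constant-factor faster);
-- preprocessing is kept identical.

-- ===== PORT A =====
-- shared preprocessing (identical lines in Source A and Source B; tokens are handled as List Char,
-- converted to String only at the very end)

-- while MesTxt.find("  ") != -1: MesTxt = MesTxt.replace("  ", " ")
-- (fuel: every iteration with an occurrence of "  " shortens the string, so length+1 passes suffice)
def ppCollapse : Nat → List Char → List Char
  | 0, s => s
  | fuel + 1, s =>
    if PySem.Chars.find s [' ', ' '] ≠ -1 then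
      ppCollapse fuel (PySem.Chars.replace s [' ', ' '] [' '])
    else s

-- while MesTxt.find("'") != -1: MesTxt = MesTxt.replace("'", "")
def ppApos : Nat → List Char → List Char
  | 0, s => s
  | fuel + 1, s =>
    if PySem.Chars.find s ['\''] ≠ -1 then
      ppApos fuel (PySem.Chars.replace s ['\''] [])
    else s

-- for i in range(len(MesTxt) - 2): comma flanked by digits becomes a dot
-- (s[0:i+1] + "." + s[i+2:len(s)] with 0 ≤ i+1 ≤ i+2 ≤ len is exactly take/drop; length is preserved,
-- so re-checking i + 2 < length is the original loop bound)
def ppComma (i : Nat) (cs : List Char) : List Char :=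
  if h : i + 2 < cs.length then
    if PySem.Chars.isdigit (cs.getD i ' ') && PySem.Chars.isdigit (cs.getD (i + 2) ' ')
        && (cs.getD (i + 1) ' ' == ',') then
      ppComma (i + 1) (cs.take (i + 1) ++ '.' :: cs.drop (i + 2))
    else ppComma (i + 1) cs
  else cs
termination_by cs.length - i
decreasing_by
  · simp only [List.length_append, List.length_take, List.length_cons, List.length_drop]; omega
  · omega

def pre (MesTxt : String) : List Char :=
  let s1 := PySem.Chars.replace MesTxt.toList ['\n'] [' ', ',', ' ']
  let s2 := ppCollapse (s1.length + 1) s1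
  let s3 := ppApos (s2.length + 1) s2
  ppComma 0 s3

-- the five elif branches of A's tokenizer have identical bodies; they are transcribed as one
-- ordered disjunction
def acut (c d : Char) : Bool :=
  (PySem.Chars.isalpha c && !PySem.Chars.isalpha d && !PySem.Chars.isdigit d) ||
  (PySem.Chars.isalpha d && !PySem.Chars.isalpha c && !PySem.Chars.isdigit c) ||
  (!PySem.Chars.isalpha c && !PySem.Chars.isdigit c && !PySem.Chars.isalpha d && !PySem.Chars.isdigit d) ||
  (PySem.Chars.isdigit c && !PySem.Chars.isdigit d && !(d == ' ') && !(d == '.')) ||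
  (!PySem.Chars.isdigit c && PySem.Chars.isdigit d && !(c == ' ') && !(c == '.'))

-- A's main loop: for i in range(len(s)) with mutable start/end and list a
-- (indices i, i+1 are always in range where read, so getD is exact for s[i])
def tokA (cs : List Char) (i start : Nat) (acc : List (List Char)) : List (List Char) :=
  if i < cs.length then
    if cs.getD i ' ' == ' ' then
      tokA cs (i + 1) (i + 1) (acc ++ [PySem.List.slice cs (some (start : Int)) (some (i : Int))])
    else if i == cs.length - 1 then
      tokA cs (i + 1) start (acc ++ [PySem.List.slice cs (some (start : Int)) (some (cs.length : Int))])
    else if acut (cs.getD i ' ') (cs.getD (i + 1) ' ') then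
      tokA cs (i + 1) (i + 1) (acc ++ [PySem.List.slice cs (some (start : Int)) (some ((i + 1 : Nat) : Int))])
    else
      tokA cs (i + 1) start acc
  else acc
termination_by cs.length - i
decreasing_by all_goals omega

-- while b[i].find(".") != -1: b[i] = b[i].replace(".", "") (fuel length+1 suffices: one replace
-- removes every dot)
def dotLoop : Nat → List Char → List Char
  | 0, t => t
  | fuel + 1, t =>
    if PySem.Chars.find t ['.'] ≠ -1 then dotLoop fuel (PySem.Chars.replace t ['.'] [])
    else t

-- for i in range(len(b)): in-place conditional rewrite of b[i]
def finA : List (List Char) → List (List Char)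
  | [] => []
  | t :: r =>
    (if PySem.Chars.isdigit (t.getD 0 ' ') && decide (2 ≤ PySem.Chars.count t ['.']) then
       dotLoop (t.length + 1) t
     else t) :: finA r

def SpecialSplit (MesTxt : String) : List String :=
  -- a = tokA …; b = a.filter(≠ ""); return final pass over b
  (finA ((tokA (pre MesTxt) 0 0 []).filter (fun t => !(t == [])))).map String.ofList

-- ===== PORT B =====
def sameTok (c d : Char) : Bool :=
  (PySem.Chars.isalpha c && PySem.Chars.isalpha d) ||
  (PySem.Chars.isdigit c && PySem.Chars.isdigit d) ||
  (PySem.Chars.isdigit c && (d == '.')) ||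
  ((c == '.') && PySem.Chars.isdigit d)

def ccutB (c d : Char) : Bool := (c == ' ') || (d == ' ') || !sameTok c d

-- phase 1: for i in range(len(s) - 1): collect boundary indices i+1
def cutsB (cs : List Char) (i : Nat) : List Nat :=
  if i + 1 < cs.length then
    if ccutB (cs.getD i ' ') (cs.getD (i + 1) ' ') then (i + 1) :: cutsB cs (i + 1)
    else cutsB cs (i + 1)
  else []
termination_by cs.length - i
decreasing_by all_goals omega

-- phase 2: prev = 0; for c in cuts + [len(s)]: slice, drop "" and " " pieces
def piecesB (cs : List Char) : Nat → List Nat → List (List Char) → List (List Char)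
  | _, [], acc => acc
  | prev, c :: rest, acc =>
    let piece := PySem.List.slice cs (some (prev : Int)) (some (c : Int))
    piecesB cs c rest (if !(piece == []) && !(piece == [' ']) then acc ++ [piece] else acc)

def SpecialSplit_alt (MesTxt : String) : List String :=
  ((piecesB (pre MesTxt) 0 (cutsB (pre MesTxt) 0 ++ [(pre MesTxt).length]) []).map (fun t =>
    if PySem.Chars.isdigit (t.getD 0 ' ') && decide (2 ≤ PySem.Chars.count t ['.']) then
      PySem.Chars.replace t ['.'] []
    else t)).map String.ofList

-- ===== PRECONDITION & SPEC =====
def Spec_SpecialSplit (MesTxt : String) (out : List String) : Prop := out = SpecialSplit_alt MesTxt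
instance (MesTxt : String) (out : List String) : Decidable (Spec_SpecialSplit MesTxt out) := by unfold Spec_SpecialSplit; infer_instance

-- ===== CLAIM (what is proved, stated in full; the proofs are below) =====
def Claim_equal_SpecialSplit : Prop := ∀ (MesTxt : String), Dom_SpecialSplit MesTxt → Spec_SpecialSplit MesTxt (SpecialSplit MesTxt)

-- ===== LEMMAS AND PROOFS =====

lemma alpha_digit_false (c : Char) (h : PySem.Chars.isalpha c = true) :
    PySem.Chars.isdigit c = false := by
  simp [PySem.Chars.isalpha, PySem.Chars.isupper, PySem.Chars.islower] at h
  cases hd : PySem.Chars.isdigit c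
  · rfl
  · simp [PySem.Chars.isdigit] at hd
    rcases h with ⟨h1, h2⟩ | ⟨h1, h2⟩ <;> exact absurd (le_trans h1 hd.2) (by decide)

lemma alpha_ne_dot (c : Char) (h : PySem.Chars.isalpha c = true) : c ≠ '.' := by
  rintro rfl; exact absurd h (by decide)
lemma digit_ne_dot (c : Char) (h : PySem.Chars.isdigit c = true) : c ≠ '.' := by
  rintro rfl; exact absurd h (by decide)

lemma acut_eq_not_same (c d : Char) (hc : c ≠ ' ') (hd : d ≠ ' ') :
    acut c d = !sameTok c d := by
  have hc0 : (c == ' ') = false := by simp [hc]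
  have hd0 : (d == ' ') = false := by simp [hd]
  unfold acut sameTok
  cases hA : PySem.Chars.isalpha c <;> cases hD : PySem.Chars.isdigit c <;>
    cases hA' : PySem.Chars.isalpha d <;> cases hD' : PySem.Chars.isdigit d <;>
    cases hPc : (c == '.') <;> cases hPd : (d == '.') <;>
    first
      | (exfalso; rw [alpha_digit_false _ hA] at hD; exact Bool.false_ne_true hD)
      | (exfalso; rw [alpha_digit_false _ hA'] at hD'; exact Bool.false_ne_true hD')
      | (exfalso; exact digit_ne_dot _ hD (by simpa using hPc))
      | (exfalso; exact digit_ne_dot _ hD' (by simpa using hPd))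
      | (exfalso; exact alpha_ne_dot _ hA (by simpa using hPc))
      | (exfalso; exact alpha_ne_dot _ hA' (by simpa using hPd))
      | simp [hA, hD, hA', hD', hc0, hd0, hPc, hPd]

lemma tokA_acc (cs : List Char) : ∀ (k i start : Nat), cs.length - i = k → ∀ acc,
    tokA cs i start acc = acc ++ tokA cs i start [] := by
  intro k
  induction k with
  | zero =>
    intro i start hk acc
    have h : ¬ i < cs.length := by omega
    rw [tokA]; conv_rhs => rw [tokA]
    simp [h]
  | succ k ih =>
    intro i start hk acc
    by_cases h : i < cs.length
    · rw [tokA]; conv_rhs => rw [tokA]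
      simp only [h, if_pos]
      simp only [List.nil_append]
      split
      · rw [ih (i+1) (i+1) (by omega), ih (i+1) (i+1) (by omega) [_]]; simp
      · split
        · rw [ih (i+1) start (by omega), ih (i+1) start (by omega) [_]]; simp
        · split
          · rw [ih (i+1) (i+1) (by omega), ih (i+1) (i+1) (by omega) [_]]; simp
          · rw [ih (i+1) start (by omega)]
    · have h' := h
      rw [tokA]; conv_rhs => rw [tokA]
      simp [h']

lemma piecesB_acc (cs : List Char) : ∀ (l : List Nat) (prev : Nat) (acc : List (List Char)),
    piecesB cs prev l acc = acc ++ piecesB cs prev l [] := by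
  intro l
  induction l with
  | nil => intro prev acc; rw [piecesB, piecesB]; simp
  | cons c rest ih =>
    intro prev acc
    rw [piecesB, piecesB]
    split
    · simp only [List.nil_append]
      rw [ih c (acc ++ [_]), ih c [_]]; simp
    · exact ih c acc

lemma cutsB_stop (cs : List Char) (i : Nat) (h : ¬ i + 1 < cs.length) : cutsB cs i = [] := by
  rw [cutsB]; simp [h]

lemma cutsB_cons (cs : List Char) (i : Nat) (h : i + 1 < cs.length)
    (hc : ccutB (cs.getD i ' ') (cs.getD (i + 1) ' ') = true) :
    cutsB cs i = (i + 1) :: cutsB cs (i + 1) := by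
  rw [cutsB, if_pos h, if_pos hc]

lemma cutsB_skip (cs : List Char) (i : Nat) (h : i + 1 < cs.length)
    (hc : ccutB (cs.getD i ' ') (cs.getD (i + 1) ' ') = false) :
    cutsB cs i = cutsB cs (i + 1) := by
  rw [cutsB, if_pos h, if_neg (by simp only [hc]; exact Bool.false_ne_true)]

lemma cutsB_chain (cs : List Char) : ∀ (n a b : Nat), b - a = n → a ≤ b →
    (∀ j, a ≤ j → j < b → j + 1 < cs.length ∧ ccutB (cs.getD j ' ') (cs.getD (j + 1) ' ') = false) →
    cutsB cs a = cutsB cs b := by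
  intro n
  induction n with
  | zero =>
    intro a b hn hab h
    have hab' : a = b := by omega
    subst hab'; rfl
  | succ n ih =>
    intro a b hn hab h
    have ha : a < b := by omega
    obtain ⟨h1, h2⟩ := h a le_rfl ha
    rw [cutsB_skip cs a h1 h2]
    exact ih (a+1) b (by omega) (by omega) (fun j hj hj2 => h j (by omega) hj2)

lemma piece_ne_nil (cs : List Char) (a b : Nat) (hab : a < b) (ha : a < cs.length) :
    ((cs.drop a).take (b - a)) ≠ [] := by
  have : ((cs.drop a).take (b - a)).length = min (b - a) (cs.length - a) := by simp
  intro h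
  rw [h] at this
  simp at this
  omega

lemma piece_head (cs : List Char) (a b : Nat) (hab : a < b) (ha : a < cs.length) :
    ((cs.drop a).take (b - a)).head? = some (cs.getD a ' ') := by
  rw [List.head?_take, if_neg (by omega), List.head?_drop,
    List.getElem?_eq_getElem ha]
  simp [List.getD_eq_getElem?_getD, List.getElem?_eq_getElem ha]

lemma piece_ne_space (cs : List Char) (a b : Nat) (hab : a < b) (ha : a < cs.length)
    (hsp : cs.getD a ' ' ≠ ' ') : ((cs.drop a).take (b - a)) ≠ [' '] := by
  intro h
  have := piece_head cs a b hab ha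
  rw [h] at this
  simp at this
  exact hsp this.symm

lemma piece_single (cs : List Char) (a : Nat) (ha : a < cs.length) :
    ((cs.drop a).take 1) = [cs.getD a ' '] := by
  have hg : cs.getD a ' ' = cs[a] := by
    simp [List.getD_eq_getElem?_getD, List.getElem?_eq_getElem ha]
  rw [hg, List.drop_eq_getElem_cons ha]
  rfl

lemma ccut_of_space_right (cs : List Char) (i : Nat) (h : cs.getD (i + 1) ' ' = ' ') :
    ccutB (cs.getD i ' ') (cs.getD (i + 1) ' ') = true := by
  simp only [ccutB, h]
  simp

lemma ccut_of_space_left (cs : List Char) (i : Nat) (h : cs.getD i ' ' = ' ') :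
    ccutB (cs.getD i ' ') (cs.getD (i + 1) ' ') = true := by
  simp only [ccutB, h]
  simp

lemma space_step (cs : List Char) (i : Nat) (hi : i < cs.length) (hsp : cs.getD i ' ' = ' ') :
    piecesB cs i (cutsB cs i ++ [cs.length]) [] =
    piecesB cs (i + 1) (cutsB cs (i + 1) ++ [cs.length]) [] := by
  by_cases h : i + 1 < cs.length
  · rw [cutsB_cons cs i h (ccut_of_space_left cs i hsp)]
    rw [List.cons_append, piecesB]
    have hp : PySem.List.slice cs (some (i : Int)) (some ((i + 1 : Nat) : Int)) = [' '] := by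
      rw [PySem.List.slice_natCast]
      have e : i + 1 - i = 1 := by omega
      rw [e, piece_single cs i hi, hsp]
    simp only [hp]
    norm_num
  · have hstop : cutsB cs i = [] := cutsB_stop cs i h
    have hstop' : cutsB cs (i + 1) = [] := cutsB_stop cs (i + 1) (by omega)
    rw [hstop, hstop']
    simp only [List.nil_append]
    have e1 : PySem.List.slice cs (some (i : Int)) (some (cs.length : Int)) = [' '] := by
      rw [PySem.List.slice_natCast]
      have e : cs.length - i = 1 := by omega
      rw [e, piece_single cs i hi, hsp]
    have e2 : PySem.List.slice cs (some ((i + 1 : Nat) : Int)) (some (cs.length : Int)) = [] := by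
      rw [PySem.List.slice_natCast]
      have e : cs.length - (i + 1) = 0 := by omega
      rw [e]; simp
    rw [piecesB]; conv_rhs => rw [piecesB]
    simp only [e1, e2]
    norm_num

lemma ccut_false (cs : List Char) (j : Nat) (h1 : cs.getD j ' ' ≠ ' ')
    (h2 : cs.getD (j + 1) ' ' ≠ ' ')
    (h3 : sameTok (cs.getD j ' ') (cs.getD (j + 1) ' ') = true) :
    ccutB (cs.getD j ' ') (cs.getD (j + 1) ' ') = false := by
  have e1 : (cs.getD j ' ' == ' ') = false := beq_eq_false_iff_ne.mpr h1
  have e2 : (cs.getD (j + 1) ' ' == ' ') = false := beq_eq_false_iff_ne.mpr h2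
  simp only [ccutB, h3, e1, e2]
  rfl

lemma chain_to_i (cs : List Char) (start i : Nat) (hsi : start ≤ i) (hlen : i < cs.length)
    (hsp : ∀ j, start ≤ j → j < i → cs.getD j ' ' ≠ ' ')
    (hspi : cs.getD i ' ' ≠ ' ')
    (hsm : ∀ j, start ≤ j → j + 1 ≤ i → j + 1 < cs.length →
      sameTok (cs.getD j ' ') (cs.getD (j + 1) ' ') = true ∨ cs.getD (j + 1) ' ' = ' ') :
    cutsB cs start = cutsB cs i := by
  refine cutsB_chain cs (i - start) start i rfl hsi (fun j hj hji => ⟨by omega, ?_⟩)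
  have h1 : cs.getD j ' ' ≠ ' ' := hsp j hj (by omega)
  have h2 : cs.getD (j + 1) ' ' ≠ ' ' := by
    by_cases hc : j + 1 < i
    · exact hsp (j + 1) (by omega) hc
    · have : j + 1 = i := by omega
      rw [this]; exact hspi
  have h3 : sameTok (cs.getD j ' ') (cs.getD (j + 1) ' ') = true :=
    (hsm j hj (by omega) (by omega)).resolve_right h2
  exact ccut_false cs j h1 h2 h3

lemma keep_true (p : List Char) (h1 : p ≠ []) (h2 : p ≠ [' ']) :
    (!(p == []) && !(p == [' '])) = true := by simp [h1, h2]

lemma bridge (cs : List Char) : ∀ (k i start : Nat), cs.length - i = k → start ≤ i →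
    (i < cs.length ∨ start = i) →
    (∀ j, start ≤ j → j < i → cs.getD j ' ' ≠ ' ') →
    (∀ j, start ≤ j → j + 1 ≤ i → j + 1 < cs.length →
      sameTok (cs.getD j ' ') (cs.getD (j + 1) ' ') = true ∨ cs.getD (j + 1) ' ' = ' ') →
    piecesB cs start (cutsB cs start ++ [cs.length]) [] =
      (tokA cs i start []).filter (fun t => !(t == [])) := by
  intro k
  induction k with
  | zero =>
    intro i start hk h1 h2 hsp hsm
    have hni : ¬ i < cs.length := by omega
    have hstart : start = i := h2.resolve_left hni
    subst hstart
    rw [tokA, if_neg hni]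
    rw [cutsB_stop cs start (by omega), List.nil_append, piecesB]
    have e : PySem.List.slice cs (some (start : Int)) (some (cs.length : Int)) = [] := by
      rw [PySem.List.slice_natCast]
      have e2 : cs.length - start = 0 := by omega
      rw [e2]; simp
    simp only [e]
    norm_num
    rw [piecesB]
  | succ k ih =>
    intro i start hk h1 h2 hsp hsm
    have hi : i < cs.length := by omega
    rw [tokA, if_pos hi]
    by_cases hspi : cs.getD i ' ' = ' '
    · -- space branch
      have hBeq : (cs.getD i ' ' == ' ') = true := by rw [hspi]; decide
      rw [if_pos hBeq]
      rw [tokA_acc cs (cs.length - (i + 1)) (i + 1) (i + 1) rfl, List.filter_append]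
      by_cases hse : start = i
      · subst hse
        have e : PySem.List.slice cs (some (start : Int)) (some (start : Int)) = [] := by
          rw [PySem.List.slice_natCast]; simp
        rw [e]
        rw [space_step cs start hi hspi]
        rw [ih (start + 1) (start + 1) (by omega) le_rfl (Or.inr rfl)
          (fun j hj hj2 => by omega) (fun j hj hj2 hj3 => by omega)]
        simp
      · have hlt : start < i := by omega
        have hchain : cutsB cs start = cutsB cs (i - 1) := by
          refine cutsB_chain cs ((i - 1) - start) start (i - 1) rfl (by omega)
            (fun j hj hji => ⟨by omega, ?_⟩)
          have e1 : cs.getD j ' ' ≠ ' ' := hsp j hj (by omega)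
          have e2 : cs.getD (j + 1) ' ' ≠ ' ' := hsp (j + 1) (by omega) (by omega)
          exact ccut_false cs j e1 e2
            ((hsm j hj (by omega) (by omega)).resolve_right e2)
        have e : i - 1 + 1 = i := by omega
        have hcons := cutsB_cons cs (i - 1) (by omega)
          (ccut_of_space_right cs (i - 1) (by rw [e]; exact hspi))
        rw [e] at hcons
        rw [hchain, hcons, List.cons_append, piecesB]
        have hsl : PySem.List.slice cs (some (start : Int)) (some (i : Int)) =
            (cs.drop start).take (i - start) := PySem.List.slice_natCast cs start i
        have hkeep : (!(PySem.List.slice cs (some (start : Int)) (some (i : Int)) == []) &&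
            !(PySem.List.slice cs (some (start : Int)) (some (i : Int)) == [' '])) = true := by
          rw [hsl]
          exact keep_true _ (piece_ne_nil cs start i hlt (by omega))
            (piece_ne_space cs start i hlt (by omega) (hsp start le_rfl hlt))
        simp only [hkeep, if_true, List.nil_append]
        rw [piecesB_acc cs (cutsB cs i ++ [cs.length]) i]
        rw [space_step cs i hi hspi]
        rw [ih (i + 1) (i + 1) (by omega) le_rfl (Or.inr rfl)
          (fun j hj hj2 => by omega) (fun j hj hj2 hj3 => by omega)]
        have hfk : (fun t => !(t == [])) (PySem.List.slice cs (some (start : Int)) (some (i : Int))) = true := by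
          rw [hsl]
          simp only [Bool.not_eq_eq_eq_not, Bool.not_true, beq_eq_false_iff_ne, ne_eq]
          exact piece_ne_nil cs start i hlt (by omega)
        simp only [List.filter_singleton, List.filter_nil, List.append_nil, hfk]
        try simp
    · have hBeq : (cs.getD i ' ' == ' ') = false := beq_eq_false_iff_ne.mpr hspi
      rw [if_neg (by simp only [hBeq]; exact Bool.false_ne_true)]
      have hchain : cutsB cs start = cutsB cs i := chain_to_i cs start i h1 hi hsp hspi hsm
      by_cases hlast : i = cs.length - 1
      · have hb : (i == cs.length - 1) = true := by simp [hlast]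
        rw [if_pos hb]
        rw [tokA_acc cs (cs.length - (i + 1)) (i + 1) start rfl, List.filter_append]
        have hstop2 : tokA cs (i + 1) start [] = [] := by
          rw [tokA, if_neg (by omega)]
        rw [hstop2]
        rw [hchain, cutsB_stop cs i (by omega), List.nil_append, piecesB]
        have hsl : PySem.List.slice cs (some (start : Int)) (some (cs.length : Int)) =
            (cs.drop start).take (cs.length - start) := PySem.List.slice_natCast cs start cs.length
        have hsps : cs.getD start ' ' ≠ ' ' := by
          by_cases hse : start = i
          · rw [hse]; exact hspi
          · exact hsp start le_rfl (by omega)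
        have hkeep : (!(PySem.List.slice cs (some (start : Int)) (some (cs.length : Int)) == []) &&
            !(PySem.List.slice cs (some (start : Int)) (some (cs.length : Int)) == [' '])) = true := by
          rw [hsl]
          exact keep_true _ (piece_ne_nil cs start cs.length (by omega) (by omega))
            (piece_ne_space cs start cs.length (by omega) (by omega) hsps)
        simp only [hkeep, if_true, List.nil_append]
        rw [piecesB]
        have hfk : (fun t => !(t == [])) (PySem.List.slice cs (some (start : Int)) (some (cs.length : Int))) = true := by
          rw [hsl]
          simp only [Bool.not_eq_eq_eq_not, Bool.not_true, beq_eq_false_iff_ne, ne_eq]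
          exact piece_ne_nil cs start cs.length (by omega) (by omega)
        simp only [List.filter_singleton, List.filter_nil, List.append_nil, hfk]
        try simp
      · have hb : (i == cs.length - 1) = false := by simp [hlast]
        rw [if_neg (by simp only [hb]; exact Bool.false_ne_true)]
        have hi1 : i + 1 < cs.length := by omega
        have hsps : cs.getD start ' ' ≠ ' ' := by
          by_cases hse : start = i
          · rw [hse]; exact hspi
          · exact hsp start le_rfl (by omega)
        by_cases hacut : acut (cs.getD i ' ') (cs.getD (i + 1) ' ') = true
        · rw [if_pos hacut]
          have hccut : ccutB (cs.getD i ' ') (cs.getD (i + 1) ' ') = true := by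
            by_cases hs2 : cs.getD (i + 1) ' ' = ' '
            · exact ccut_of_space_right cs i hs2
            · have he := acut_eq_not_same (cs.getD i ' ') (cs.getD (i + 1) ' ') hspi hs2
              rw [he] at hacut
              have hsame : sameTok (cs.getD i ' ') (cs.getD (i + 1) ' ') = false := by
                simpa using hacut
              simp only [ccutB, hsame, Bool.not_false, Bool.or_true]
          rw [tokA_acc cs (cs.length - (i + 1)) (i + 1) (i + 1) rfl, List.filter_append]
          rw [hchain, cutsB_cons cs i hi1 hccut, List.cons_append, piecesB]
          have hsl : PySem.List.slice cs (some (start : Int)) (some ((i + 1 : Nat) : Int)) =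
              (cs.drop start).take (i + 1 - start) := PySem.List.slice_natCast cs start (i + 1)
          have hkeep : (!(PySem.List.slice cs (some (start : Int)) (some ((i + 1 : Nat) : Int)) == []) &&
              !(PySem.List.slice cs (some (start : Int)) (some ((i + 1 : Nat) : Int)) == [' '])) = true := by
            rw [hsl]
            exact keep_true _ (piece_ne_nil cs start (i + 1) (by omega) (by omega))
              (piece_ne_space cs start (i + 1) (by omega) (by omega) hsps)
          simp only [hkeep, if_true, List.nil_append]
          rw [piecesB_acc cs (cutsB cs (i + 1) ++ [cs.length]) (i + 1)]
          rw [ih (i + 1) (i + 1) (by omega) le_rfl (Or.inl hi1)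
            (fun j hj hj2 => by omega) (fun j hj hj2 hj3 => by omega)]
          have hfk : (fun t => !(t == [])) (PySem.List.slice cs (some (start : Int)) (some ((i + 1 : Nat) : Int))) = true := by
            rw [hsl]
            simp only [Bool.not_eq_eq_eq_not, Bool.not_true, beq_eq_false_iff_ne, ne_eq]
            exact piece_ne_nil cs start (i + 1) (by omega) (by omega)
          simp only [List.filter_singleton, List.filter_nil, List.append_nil, hfk]
          try simp
        · rw [if_neg hacut]
          refine ih (i + 1) start (by omega) (by omega) (Or.inl hi1) ?_ ?_
          · intro j hj hj2
            by_cases hji : j < i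
            · exact hsp j hj hji
            · have : j = i := by omega
              rw [this]; exact hspi
          · intro j hj hj2 hj3
            by_cases hji : j + 1 ≤ i
            · exact hsm j hj hji hj3
            · have hje : j = i := by omega
              subst hje
              by_cases hs2 : cs.getD (j + 1) ' ' = ' '
              · exact Or.inr hs2
              · left
                have he := acut_eq_not_same (cs.getD j ' ') (cs.getD (j + 1) ' ') hspi hs2
                by_contra hcon
                have : sameTok (cs.getD j ' ') (cs.getD (j + 1) ' ') = false :=
                  Bool.eq_false_iff.mpr hcon
                rw [this] at he
                simp at he
                exact hacut he

lemma replace_go_no_dot : ∀ (fuel : Nat) (l acc : List Char), l.length ≤ fuel →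
    '.' ∉ acc → '.' ∉ PySem.Chars.replace.go ['.'] [] fuel l acc := by
  intro fuel
  induction fuel with
  | zero =>
    intro l acc hl hacc
    have hnil : l = [] := List.eq_nil_of_length_eq_zero (by omega)
    subst hnil
    rw [PySem.Chars.replace.go.eq_def]
    simpa using hacc
  | succ fuel ih =>
    intro l acc hl hacc
    cases l with
    | nil =>
      rw [PySem.Chars.replace.go.eq_def]
      simpa using hacc
    | cons c t =>
      rw [PySem.Chars.replace.go.eq_def]
      by_cases hp : ['.'].isPrefixOf (c :: t) = true
      · simp only [hp, if_true]
        exact ih (List.drop 1 (c :: t)) _ (by simp at hl ⊢; omega) (by simpa using hacc)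
      · simp only [eq_false_of_ne_true hp, Bool.false_eq_true, if_false]
        refine ih t (c :: acc) (by simp at hl ⊢; omega) ?_
        intro hm
        rcases List.mem_cons.mp hm with hm | hm
        · apply hp
          rw [← hm]
          simp [List.isPrefixOf]
        · exact hacc hm

lemma no_dot_replace (t : List Char) : '.' ∉ PySem.Chars.replace t ['.'] [] := by
  rw [PySem.Chars.replace, if_neg (by simp)]
  exact replace_go_no_dot t.length t [] le_rfl (by simp)

lemma count_go_zero : ∀ (fuel : Nat) (l : List Char) (acc : Nat), '.' ∉ l →
    PySem.Chars.count.go ['.'] fuel l acc = acc := by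
  intro fuel
  induction fuel with
  | zero =>
    intro l acc hl
    rw [PySem.Chars.count.go.eq_def]
  | succ fuel ih =>
    intro l acc hl
    cases l with
    | nil => rw [PySem.Chars.count.go.eq_def]
    | cons c t =>
      rw [PySem.Chars.count.go.eq_def]
      have hp : ['.'].isPrefixOf (c :: t) = false := by
        simp [List.isPrefixOf]
        intro h
        exact absurd (h ▸ List.mem_cons_self) hl
      simp only [hp, Bool.false_eq_true, if_false]
      exact ih t acc (fun hm => hl (List.mem_cons_of_mem c hm))

lemma dot_mem_of_count (t : List Char) (h : 2 ≤ PySem.Chars.count t ['.']) : '.' ∈ t := by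
  by_contra hm
  rw [PySem.Chars.count, if_neg (by simp), count_go_zero t.length t 0 hm] at h
  omega

lemma dotLoop_id (fuel : Nat) (t : List Char) (h : PySem.Chars.find t ['.'] = -1) :
    dotLoop fuel t = t := by
  cases fuel with
  | zero => rfl
  | succ fuel => simp [dotLoop, h]

lemma dotLoop_eq_replace (t : List Char) (h : 2 ≤ PySem.Chars.count t ['.']) :
    dotLoop (t.length + 1) t = PySem.Chars.replace t ['.'] [] := by
  have hfind : PySem.Chars.find t ['.'] ≠ -1 :=
    (PySem.Chars.find_ne_neg_one_iff t ['.']).mpr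
      ((List.singleton_infix_iff '.' t).mpr (dot_mem_of_count t h))
  rw [dotLoop, if_pos hfind]
  exact dotLoop_id t.length _
    ((PySem.Chars.find_eq_neg_one_iff _ ['.']).mpr
      (fun hin => no_dot_replace t ((List.singleton_infix_iff '.' _).mp hin)))

lemma finA_eq_map (l : List (List Char)) :
    finA l = l.map (fun t =>
      if PySem.Chars.isdigit (t.getD 0 ' ') && decide (2 ≤ PySem.Chars.count t ['.']) then
        PySem.Chars.replace t ['.'] []
      else t) := by
  induction l with
  | nil => rfl
  | cons t r ih =>
    rw [finA, ih, List.map_cons]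
    by_cases hc : (PySem.Chars.isdigit (t.getD 0 ' ') && decide (2 ≤ PySem.Chars.count t ['.'])) = true
    · rw [if_pos hc, if_pos hc, dotLoop_eq_replace t (of_decide_eq_true (Bool.and_elim_right hc))]
    · rw [if_neg hc, if_neg hc]

-- ===== VERDICT (by name: the statement is the Claim_ definition above) =====
theorem SpecialSplit_spec : Claim_equal_SpecialSplit := by
  intro MesTxt _
  unfold Spec_SpecialSplit SpecialSplit SpecialSplit_alt
  rw [finA_eq_map,
    bridge (pre MesTxt) (pre MesTxt).length 0 0 rfl (Nat.zero_le _) (Or.inr rfl)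
      (by intro j hj1 hj2; omega) (by intro j hj1 hj2 hj3; omega)]
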